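-- pv_equiv track=rewrite | github.com/aronbencsiknu/NeuroEval | testbench.py | generate_valid_address_combinations
-- ===== SOURCE A (Python) =====
-- from itertools import combinations
--
-- def generate_valid_address_combinations(addr_w):
--     valid_combinations = []
--     for num_ones in range(2, addr_w + 1):  # from exactly two '1's to addr_w '1's
--         for combo in combinations(range(addr_w), num_ones):
--             bits = ['0'] * addr_w
--             for bit in combo:
--                 bits[bit] = '1'
--             valid_combinations.append(int(''.join(bits),2))
--     return valid_combinations
-- ===== SOURCE B (Python) =====
-- def generate_valid_address_combinations(addr_w):
--     # Bottom-up over the bit width: after processing width n, groups[k] is the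
--     # list of n-bit ints with exactly k ones, in descending order (A's order:
--     # combinations are lexicographic with position 0 the most-significant bit).
--     # Widening by one bit splits each group on the new most-significant bit:
--     # group(n, k) = [2^(n-1) + v for v in group(n-1, k-1)] + group(n-1, k).
--     groups = [[0]]
--     for n in range(1, addr_w + 1):
--         high = 1 << (n - 1)
--         new = [[0]]
--         for k in range(1, n + 1):
--             below = groups[k] if k < len(groups) else []
--             new.append([high + v for v in groups[k - 1]] + below)
--         groups = new
--     result = []
--     for k in range(2, addr_w + 1):
--         result += groups[k]
--     return result
-- ===== Notes on version B (the rewrite author's own statement) =====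
-- stated objective: alternative
-- what changed: Replaces itertools.combinations over bit positions plus per-combo string building and int(...,2) parsing with a bottom-up DP over the bit width: groups[k] of fixed-popcount values are rebuilt per width by splitting on the new most-significant bit, then concatenated.
import Mathlib
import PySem

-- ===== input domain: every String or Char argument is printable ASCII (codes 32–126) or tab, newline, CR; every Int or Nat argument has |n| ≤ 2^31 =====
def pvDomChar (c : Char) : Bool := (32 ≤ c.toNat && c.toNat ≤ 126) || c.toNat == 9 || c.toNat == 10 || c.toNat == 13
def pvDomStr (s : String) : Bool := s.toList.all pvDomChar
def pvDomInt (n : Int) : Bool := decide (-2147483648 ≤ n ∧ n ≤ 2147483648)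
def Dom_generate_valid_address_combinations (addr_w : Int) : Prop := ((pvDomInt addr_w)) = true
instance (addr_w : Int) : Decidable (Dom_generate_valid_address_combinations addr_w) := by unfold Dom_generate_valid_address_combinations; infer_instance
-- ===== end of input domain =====

-- B replaces combinations-of-positions + string building with a bottom-up DP over the bit
-- width that builds each fixed-popcount group once (objective: alternative algorithm).

-- ===== PORT A =====
-- itertools.combinations(l, k) in lexicographic order (library call, ported as the
-- standard recursion producing exactly that order). Positions are the Nats 0..addr_w-1
-- (range(addr_w) holds exactly these nonnegative ints, so Nat is exact here).
def combosA : List Nat → Nat → List (List Nat)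
  | _, 0 => [[]]
  | [], _ + 1 => []
  | x :: xs, k + 1 => (combosA xs k).map (fun c => x :: c) ++ combosA xs (k + 1)

-- int(s, 2) for a string of '0'/'1' characters (exact on such strings)
def intOfBin (cs : List Char) : Int :=
  cs.foldl (fun a c => 2 * a + (if c = '1' then 1 else 0)) 0

-- bits = ['0']*addr_w; for bit in combo: bits[bit] = '1'; int(''.join(bits), 2)
-- (every index is in range, so List.set is exact)
def buildVal (n : Nat) (combo : List Nat) : Int :=
  intOfBin (combo.foldl (fun bs p => bs.set p '1') (List.replicate n '0'))

def generate_valid_address_combinations (addr_w : Int) : List Int :=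
  let n := addr_w.toNat  -- range(addr_w) is empty for addr_w ≤ 0
  -- range(2, addr_w + 1) = [2, ..., addr_w]
  (((List.range (n + 1)).drop 2)).flatMap (fun k => (combosA (List.range n) k).map (buildVal n))

-- ===== PORT B =====
-- one pass of Source B's outer loop at width n (n ≥ 1): new = [[0]] then, for
-- k = 1..n, [high + v for v in groups[k-1]] + (groups[k] if k < len(groups) else [])
def stepB (n : Nat) (groups : List (List Int)) : List (List Int) :=
  [[(0 : Int)]] ++ (List.range n).map (fun k0 =>
    (groups.getD k0 []).map (fun v => 2 ^ (n - 1) + v) ++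
      (if k0 + 1 < groups.length then groups.getD (k0 + 1) [] else []))

def generate_valid_address_combinations_alt (addr_w : Int) : List Int :=
  let n := addr_w.toNat  -- both ranges are empty for addr_w ≤ 0
  let groups := (List.range n).foldl (fun gs n0 => stepB (n0 + 1) gs) [[(0 : Int)]]
  (((List.range (n + 1)).drop 2)).flatMap (fun k => groups.getD k [])

-- ===== PRECONDITION & SPEC =====
def Spec_generate_valid_address_combinations (addr_w : Int) (out : List Int) : Prop := out = generate_valid_address_combinations_alt addr_w
instance (addr_w : Int) (out : List Int) : Decidable (Spec_generate_valid_address_combinations addr_w out) := by unfold Spec_generate_valid_address_combinations; infer_instance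

-- ===== CLAIM (what is proved, stated in full; the proofs are below) =====
def Claim_equal_generate_valid_address_combinations : Prop := ∀ (addr_w : Int), Dom_generate_valid_address_combinations addr_w → Spec_generate_valid_address_combinations addr_w (generate_valid_address_combinations addr_w)

-- ===== LEMMAS AND PROOFS =====

-- proof-side description of both programs' groups: the n-bit ints with exactly
-- k ones, in descending order, by recursion on the most-significant bit
def groupB : Nat → Nat → List Int
  | _, 0 => [0]
  | 0, _ + 1 => []
  | n + 1, k + 1 => (groupB n k).map (fun v => 2 ^ n + v) ++ groupB n (k + 1)

theorem intOfBin_cons_acc (cs : List Char) (a : Int) :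
    cs.foldl (fun a c => 2 * a + (if c = '1' then 1 else 0)) a
      = a * 2 ^ cs.length + intOfBin cs := by
  induction cs generalizing a with
  | nil => simp [intOfBin]
  | cons c cs ih =>
    simp only [List.foldl_cons, List.length_cons, intOfBin]
    rw [ih, ih (2 * 0 + (if c = '1' then 1 else 0))]
    ring

theorem intOfBin_cons0 (cs : List Char) : intOfBin ('0' :: cs) = intOfBin cs := by
  simp [intOfBin]

theorem intOfBin_cons1 (cs : List Char) : intOfBin ('1' :: cs) = 2 ^ cs.length + intOfBin cs := by
  simp only [intOfBin, List.foldl_cons]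
  rw [intOfBin_cons_acc]
  norm_num [intOfBin]

theorem intOfBin_zeros (n : Nat) : intOfBin (List.replicate n '0') = 0 := by
  induction n with
  | zero => simp [intOfBin]
  | succ n ih => rw [List.replicate_succ, intOfBin_cons0, ih]

-- setting shifted positions on a cons leaves the head alone
theorem foldl_set_cons (c : List Nat) (x : Char) (bs : List Char) :
    (c.map Nat.succ).foldl (fun b p => b.set p '1') (x :: bs)
      = x :: c.foldl (fun b p => b.set p '1') bs := by
  induction c generalizing bs with
  | nil => rfl
  | cons p c ih => simp only [List.map_cons, List.foldl_cons, List.set_cons_succ]; exact ih _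

theorem combosA_map_succ (l : List Nat) (k : Nat) :
    combosA (l.map Nat.succ) k = (combosA l k).map (List.map Nat.succ) := by
  induction l generalizing k with
  | nil => cases k <;> simp [combosA]
  | cons x xs ih =>
    cases k with
    | zero => simp [combosA]
    | succ k =>
      simp only [List.map_cons, combosA, ih, List.map_append, List.map_map]
      rfl

theorem buildVal_shift (n : Nat) (c : List Nat) :
    buildVal (n + 1) (c.map Nat.succ) = buildVal n c := by
  simp only [buildVal, List.replicate_succ, foldl_set_cons, intOfBin_cons0]

theorem foldl_set_length (c : List Nat) (bs : List Char) :
    (c.foldl (fun b p => b.set p '1') bs).length = bs.length := by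
  induction c generalizing bs with
  | nil => rfl
  | cons p c ih => simp only [List.foldl_cons]; rw [ih, List.length_set]

theorem buildVal_zero_cons (n : Nat) (c : List Nat) :
    buildVal (n + 1) (0 :: c.map Nat.succ) = 2 ^ n + buildVal n c := by
  simp only [buildVal, List.foldl_cons, List.replicate_succ, List.set_cons_zero,
    foldl_set_cons, intOfBin_cons1, foldl_set_length, List.length_replicate]

-- A's per-popcount block equals groupB
theorem a_group_lemma (n k : Nat) :
    (combosA (List.range n) k).map (buildVal n) = groupB n k := by
  induction n generalizing k with
  | zero =>
    cases k with
    | zero => simp [combosA, groupB, buildVal, intOfBin]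
    | succ k => simp [combosA, groupB, List.range_zero]
  | succ n ih =>
    cases k with
    | zero => simp [combosA, groupB, buildVal, intOfBin_zeros]
    | succ k =>
      rw [List.range_succ_eq_map]
      simp only [combosA, combosA_map_succ, groupB, List.map_append, List.map_map]
      rw [← ih k, ← ih (k + 1)]
      congr 1
      · simp only [List.map_map]; apply List.map_congr_left
        intro c _; simp [Function.comp, buildVal_zero_cons]
      · apply List.map_congr_left
        intro c _; simp [Function.comp, buildVal_shift]

theorem groupB_nil (n k : Nat) (h : n < k) : groupB n k = [] := by
  induction n generalizing k with
  | zero => cases k with | zero => omega | succ k => rfl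
  | succ n ih =>
    cases k with
    | zero => omega
    | succ k => simp [groupB, ih k (by omega), ih (k + 1) (by omega)]

theorem getD_map_range (m i : Nat) (f : Nat → List Int) :
    ((List.range m).map f).getD i [] = if i < m then f i else [] := by
  split_ifs with h
  · rw [List.getD_eq_getElem _ _ (by simpa using h)]
    simp
  · rw [List.getD_eq_default _ _ (by simpa using h)]

-- B's groups after processing widths 1..n
theorem b_groups_lemma (n : Nat) :
    (List.range n).foldl (fun gs n0 => stepB (n0 + 1) gs) [[(0 : Int)]]
      = (List.range (n + 1)).map (groupB n) := by
  induction n with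
  | zero => simp [groupB]
  | succ n ih =>
    rw [List.range_succ, List.foldl_append, ih]
    simp only [List.foldl_cons, List.foldl_nil, stepB, Nat.add_sub_cancel]
    rw [show List.range (n+1+1) = 0 :: List.map Nat.succ (List.range (n+1)) from List.range_succ_eq_map]
    simp only [List.map_cons, List.map_map, List.singleton_append]
    congr 1
    · apply List.map_congr_left
      intro k0 hk0
      rw [List.mem_range] at hk0
      simp only [Function.comp]
      rw [getD_map_range, if_pos (by omega)]
      show _ = groupB (n + 1) (k0 + 1)
      rw [show groupB (n + 1) (k0 + 1)
            = (groupB n k0).map (fun v => 2 ^ n + v) ++ groupB n (k0 + 1) from rfl]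
      congr 1
      by_cases h : k0 + 1 < ((List.range (n + 1)).map (groupB n)).length
      · rw [if_pos h, getD_map_range,
          if_pos (by simpa [List.length_map, List.length_range] using h)]
      · rw [if_neg h]
        rw [groupB_nil n (k0 + 1)
          (by simp only [List.length_map, List.length_range] at h; omega)]

-- ===== VERDICT (by name: the statement is the Claim_ definition above) =====
theorem generate_valid_address_combinations_spec : Claim_equal_generate_valid_address_combinations := by
  intro addr_w _
  unfold Spec_generate_valid_address_combinations
  show _ = generate_valid_address_combinations_alt addr_w
  unfold generate_valid_address_combinations generate_valid_address_combinations_alt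
  simp only []
  rw [b_groups_lemma]
  simp only [a_group_lemma]
  rw [List.flatMap_def, List.flatMap_def]
  apply congrArg
  apply List.map_congr_left
  intro k hk
  have hkm : k < addr_w.toNat + 1 := List.mem_range.mp (List.mem_of_mem_drop hk)
  rw [getD_map_range _ _ _ , if_pos hkm]
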